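-- pv_equiv track=rewrite | github.com/giffaniriz25feb/pelni-logistics-report-automation | python/manifest_pdf_parser.py | fix_multiline_cell
-- ===== SOURCE A (Python) =====
-- def fix_multiline_cell(text):
--     if not text:
--         return ""
--     lines = str(text).split("\n")
--     result = ""
--     for i, line in enumerate(lines):
--         line = line.strip()
--         if line.endswith("-"):
--             result += line[:-1]  # hilangkan '-' dan sambung langsung
--         else:
--             result += line + " " if i < len(lines) - 1 else line
--     return result.strip()
-- ===== SOURCE B (Python) =====
-- def fix_multiline_cell(text):
--     if not text:
--         return ""
--     s = "\n".join(l.strip() for l in str(text).split("\n"))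
--     if s.endswith("-"):
--         s = s[:-1]
--     s = s.replace("-\n", "").replace("\n", " ")
--     return s.strip()
-- ===== Notes on version B (the rewrite author's own statement) =====
-- stated objective: idiomatic
-- what changed: Replaces A's enumerate loop that appends line by line with separator bookkeeping by a whole-string pipeline: join the stripped lines, drop one trailing hyphen, delete every hyphen-plus-newline continuation pair by substitution, then turn the remaining newlines into spaces.
import Mathlib
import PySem

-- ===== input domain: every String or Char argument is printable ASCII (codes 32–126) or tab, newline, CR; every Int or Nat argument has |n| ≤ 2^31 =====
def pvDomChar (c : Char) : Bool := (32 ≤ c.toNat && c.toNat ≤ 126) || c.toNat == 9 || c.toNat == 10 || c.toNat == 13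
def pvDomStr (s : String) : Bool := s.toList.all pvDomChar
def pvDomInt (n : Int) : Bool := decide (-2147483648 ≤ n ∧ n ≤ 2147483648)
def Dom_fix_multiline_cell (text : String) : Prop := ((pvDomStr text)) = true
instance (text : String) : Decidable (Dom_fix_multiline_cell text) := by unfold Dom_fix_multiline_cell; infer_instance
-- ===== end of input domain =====

-- B joins the stripped lines and collapses hyphen continuations by whole-string substitution
-- ("-\n" → "", trailing "-" dropped, "\n" → " ") instead of A's indexed per-line accumulator loop.

-- ===== PORT A =====
def fix_multiline_cell (text : String) : String :=
  if text = "" then "" else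
  let lines := PySem.Chars.splitOn text.toList ['\n']
  let result := (PySem.List.enumerate lines).foldl
    (fun result p =>
      let line := PySem.Chars.strip p.2
      if PySem.Chars.endswith line ['-'] then
        result ++ PySem.List.slice line none (some (-1))
      else
        if p.1 < (lines.length : Int) - 1 then result ++ (line ++ [' ']) else result ++ line)
    ([] : List Char)
  String.ofList (PySem.Chars.strip result)

-- ===== PORT B =====
def fix_multiline_cell_alt (text : String) : String :=
  if text = "" then "" else
  let s := PySem.Chars.join ['\n'] ((PySem.Chars.splitOn text.toList ['\n']).map PySem.Chars.strip)
  let s := if PySem.Chars.endswith s ['-'] then PySem.List.slice s none (some (-1)) else s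
  let s := PySem.Chars.replace (PySem.Chars.replace s ['-', '\n'] []) ['\n'] [' ']
  String.ofList (PySem.Chars.strip s)

-- ===== PRECONDITION & SPEC =====
def Spec_fix_multiline_cell (text : String) (out : String) : Prop := out = fix_multiline_cell_alt text
instance (text : String) (out : String) : Decidable (Spec_fix_multiline_cell text out) := by unfold Spec_fix_multiline_cell; infer_instance

-- ===== CLAIM (what is proved, stated in full; the proofs are below) =====
def Claim_equal_fix_multiline_cell : Prop := ∀ (text : String), Dom_fix_multiline_cell text → Spec_fix_multiline_cell text (fix_multiline_cell text)

-- ===== LEMMAS AND PROOFS =====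

-- xs[:-1] on lists is dropLast
lemma listSlice_neg_one (cs : List Char) : PySem.List.slice cs none (some (-1)) = cs.dropLast := by
  have h := PySem.Str.slice_to_neg_one (String.ofList cs)
  simpa [pysem] using h

-- ---- structural characterisation of Chars.splitOn · ['\n'] ----
def splitNL : List Char → List (List Char)
  | [] => [[]]
  | c :: t => if c = '\n' then [] :: splitNL t else (splitNL t).modifyHead (c :: ·)

lemma sgo_nil (fuel : Nat) (cur : List Char) (acc : List (List Char)) :
    PySem.Chars.splitOn.go ['\n'] fuel [] cur acc = (cur.reverse :: acc).reverse := by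
  rw [PySem.Chars.splitOn.go.eq_def]
  cases fuel <;> simp

lemma sgo_cons_nl (fuel : Nat) (rest cur : List Char) (acc : List (List Char)) :
    PySem.Chars.splitOn.go ['\n'] (fuel + 1) ('\n' :: rest) cur acc
      = PySem.Chars.splitOn.go ['\n'] fuel rest [] (cur.reverse :: acc) := by
  rw [PySem.Chars.splitOn.go.eq_def]
  simp [List.isPrefixOf]

lemma sgo_cons_ne (fuel : Nat) (c : Char) (rest cur : List Char) (acc : List (List Char))
    (hc : ¬ c = '\n') :
    PySem.Chars.splitOn.go ['\n'] (fuel + 1) (c :: rest) cur acc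
      = PySem.Chars.splitOn.go ['\n'] fuel rest (c :: cur) acc := by
  rw [PySem.Chars.splitOn.go.eq_def]
  simp [List.isPrefixOf, Ne.symm hc]

lemma splitOn_go_eq (fuel : Nat) : ∀ (l cur : List Char) (acc : List (List Char)), l.length ≤ fuel →
    PySem.Chars.splitOn.go ['\n'] fuel l cur acc
      = acc.reverse ++ (splitNL l).modifyHead (cur.reverse ++ ·) := by
  induction fuel with
  | zero =>
    intro l cur acc hl
    have hnil : l = [] := List.eq_nil_of_length_eq_zero (Nat.le_zero.mp hl)
    subst hnil
    rw [sgo_nil]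
    simp [splitNL]
  | succ fuel ih =>
    intro l cur acc hl
    cases l with
    | nil => rw [sgo_nil]; simp [splitNL]
    | cons c rest =>
      by_cases hc : c = '\n'
      · subst hc
        rw [sgo_cons_nl]
        rw [ih rest [] _ (by simp at hl ⊢; omega)]
        simp [splitNL]
        cases splitNL rest <;> rfl
      · rw [sgo_cons_ne fuel c rest cur acc hc]
        rw [ih rest (c :: cur) acc (by simp at hl ⊢; omega)]
        simp only [splitNL, if_neg hc, List.reverse_cons]
        cases hs : splitNL rest <;> simp

lemma splitOn_eq_splitNL (cs : List Char) : PySem.Chars.splitOn cs ['\n'] = splitNL cs := by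
  rw [show PySem.Chars.splitOn cs ['\n']
      = PySem.Chars.splitOn.go ['\n'] (cs.length + 1) cs [] [] from rfl]
  rw [splitOn_go_eq (cs.length + 1) cs [] [] (by omega)]
  cases hs : splitNL cs <;> simp

lemma splitNL_no_nl (cs : List Char) : ∀ l ∈ splitNL cs, ('\n' : Char) ∉ l := by
  induction cs with
  | nil => intro l hl; simp [splitNL] at hl; subst hl; simp
  | cons c t ih =>
    intro l hl
    by_cases hc : c = '\n'
    · subst hc
      simp only [splitNL, if_pos rfl] at hl
      rcases List.mem_cons.mp hl with rfl | hmem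
      · simp
      · exact ih l hmem
    · simp only [splitNL, if_neg hc] at hl
      cases hs : splitNL t with
      | nil => rw [hs] at hl; simp at hl
      | cons hd tl =>
        rw [hs] at hl
        simp only [List.modifyHead] at hl
        rcases List.mem_cons.mp hl with rfl | hmem
        · intro hin
          rcases List.mem_cons.mp hin with h1 | h2
          · exact hc h1.symm
          · exact ih hd (by rw [hs]; exact List.mem_cons_self) h2
        · exact ih l (by rw [hs]; exact List.mem_cons_of_mem hd hmem)

lemma mem_of_mem_strip {a : Char} {l : List Char} (h : a ∈ PySem.Chars.strip l) : a ∈ l := by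
  simp only [PySem.Chars.strip, PySem.Chars.rstrip, PySem.Chars.lstrip, List.mem_reverse] at h
  have h1 : a ∈ (List.dropWhile PySem.Chars.isspace l).reverse := by
    have := List.Sublist.mem h (List.dropWhile_sublist _)
    simpa using this
  exact List.Sublist.mem (List.mem_reverse.mp h1) (List.dropWhile_sublist _)

-- ---- structural characterisation of Chars.replace · "-\n" "" ----
def r1 : List Char → List Char
  | [] => []
  | c :: t => if (['-', '\n'] : List Char).isPrefixOf (c :: t) then r1 t.tail else c :: r1 t
termination_by l => l.length
decreasing_by all_goals (simp; try omega)

lemma rgo1_nil (fuel : Nat) (acc : List Char) :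
    PySem.Chars.replace.go ['-', '\n'] [] fuel [] acc = acc.reverse := by
  rw [PySem.Chars.replace.go.eq_def]
  cases fuel <;> simp

lemma rgo1_single (fuel : Nat) (c : Char) (acc : List Char) :
    PySem.Chars.replace.go ['-', '\n'] [] (fuel + 1) [c] acc
      = PySem.Chars.replace.go ['-', '\n'] [] fuel [] (c :: acc) := by
  rw [PySem.Chars.replace.go.eq_def]
  simp [List.isPrefixOf]

lemma rgo1_match (fuel : Nat) (t acc : List Char) :
    PySem.Chars.replace.go ['-', '\n'] [] (fuel + 1) ('-' :: '\n' :: t) acc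
      = PySem.Chars.replace.go ['-', '\n'] [] fuel t acc := by
  rw [PySem.Chars.replace.go.eq_def]
  simp [List.isPrefixOf]

lemma rgo1_nomatch (fuel : Nat) (c d : Char) (t acc : List Char) (hp : ¬ (c = '-' ∧ d = '\n')) :
    PySem.Chars.replace.go ['-', '\n'] [] (fuel + 1) (c :: d :: t) acc
      = PySem.Chars.replace.go ['-', '\n'] [] fuel (d :: t) (c :: acc) := by
  rw [PySem.Chars.replace.go.eq_def]
  have hfalse : (['-', '\n'] : List Char).isPrefixOf (c :: d :: t) = false := by
    simp [List.isPrefixOf]; intro h1 h2; exact hp ⟨h1.symm, h2.symm⟩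
  simp [hfalse]

lemma r1_nomatch (c d : Char) (t : List Char) (hp : ¬ (c = '-' ∧ d = '\n')) :
    r1 (c :: d :: t) = c :: r1 (d :: t) := by
  rw [r1]
  rw [if_neg (by simp [List.isPrefixOf]; intro h1 h2; exact hp ⟨h1.symm, h2.symm⟩)]

lemma replace_go_r1 (fuel : Nat) : ∀ (l acc : List Char), l.length ≤ fuel →
    PySem.Chars.replace.go ['-', '\n'] [] fuel l acc = acc.reverse ++ r1 l := by
  induction fuel with
  | zero =>
    intro l acc hl
    have hnil : l = [] := List.eq_nil_of_length_eq_zero (Nat.le_zero.mp hl)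
    subst hnil
    rw [rgo1_nil]
    simp [r1]
  | succ fuel ih =>
    intro l acc hl
    cases l with
    | nil => rw [rgo1_nil]; simp [r1]
    | cons c t =>
      cases t with
      | nil =>
        rw [rgo1_single, ih [] (c :: acc) (by simp)]
        rw [show r1 [c] = [c] from by
          rw [r1, if_neg (by simp [List.isPrefixOf])]
          simp [r1]]
        simp [r1]
      | cons d t' =>
        by_cases hp : c = '-' ∧ d = '\n'
        · obtain ⟨rfl, rfl⟩ := hp
          rw [rgo1_match, ih t' acc (by simp at hl ⊢; omega)]
          rw [show r1 ('-' :: '\n' :: t') = r1 t' from by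
            rw [r1, if_pos (by simp [List.isPrefixOf])]
            rfl]
        · rw [rgo1_nomatch fuel c d t' acc hp]
          rw [ih (d :: t') (c :: acc) (by simp at hl ⊢; omega)]
          rw [r1_nomatch c d t' hp]
          simp

lemma replace_eq_r1 (s : List Char) : PySem.Chars.replace s ['-', '\n'] [] = r1 s := by
  rw [show PySem.Chars.replace s ['-', '\n'] []
      = PySem.Chars.replace.go ['-', '\n'] [] s.length s [] from rfl]
  rw [replace_go_r1 s.length s [] (le_refl _)]
  simp

-- ---- structural characterisation of Chars.replace · "\n" " " ----
def r2 : List Char → List Char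
  | [] => []
  | c :: t => if c = '\n' then ' ' :: r2 t else c :: r2 t

lemma rgo2_nil (fuel : Nat) (acc : List Char) :
    PySem.Chars.replace.go ['\n'] [' '] fuel [] acc = acc.reverse := by
  rw [PySem.Chars.replace.go.eq_def]
  cases fuel <;> simp

lemma rgo2_match (fuel : Nat) (t acc : List Char) :
    PySem.Chars.replace.go ['\n'] [' '] (fuel + 1) ('\n' :: t) acc
      = PySem.Chars.replace.go ['\n'] [' '] fuel t (' ' :: acc) := by
  rw [PySem.Chars.replace.go.eq_def]
  simp [List.isPrefixOf]

lemma rgo2_nomatch (fuel : Nat) (c : Char) (t acc : List Char) (hc : ¬ c = '\n') :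
    PySem.Chars.replace.go ['\n'] [' '] (fuel + 1) (c :: t) acc
      = PySem.Chars.replace.go ['\n'] [' '] fuel t (c :: acc) := by
  rw [PySem.Chars.replace.go.eq_def]
  simp [List.isPrefixOf, Ne.symm hc]

lemma replace_go_r2 (fuel : Nat) : ∀ (l acc : List Char), l.length ≤ fuel →
    PySem.Chars.replace.go ['\n'] [' '] fuel l acc = acc.reverse ++ r2 l := by
  induction fuel with
  | zero =>
    intro l acc hl
    have hnil : l = [] := List.eq_nil_of_length_eq_zero (Nat.le_zero.mp hl)
    subst hnil
    rw [rgo2_nil]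
    simp [r2]
  | succ fuel ih =>
    intro l acc hl
    cases l with
    | nil => rw [rgo2_nil]; simp [r2]
    | cons c t =>
      by_cases hc : c = '\n'
      · subst hc
        rw [rgo2_match, ih t _ (by simp at hl ⊢; omega)]
        simp [r2]
      · rw [rgo2_nomatch fuel c t acc hc, ih t (c :: acc) (by simp at hl ⊢; omega)]
        simp [r2, hc]

lemma replace_eq_r2 (s : List Char) : PySem.Chars.replace s ['\n'] [' '] = r2 s := by
  rw [show PySem.Chars.replace s ['\n'] [' ']
      = PySem.Chars.replace.go ['\n'] [' '] s.length s [] from rfl]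
  rw [replace_go_r2 s.length s [] (le_refl _)]
  simp

lemma endswith_single (s : List Char) (c : Char) :
    PySem.Chars.endswith s [c] = true ↔ s.getLast? = some c := by
  rw [PySem.Chars.endswith_iff, List.getLast?_eq_some_iff]
  constructor
  · rintro ⟨t, rfl⟩; exact ⟨t, rfl⟩
  · rintro ⟨t, rfl⟩; exact ⟨t, rfl⟩

lemma endswith_eq_getLast (s : List Char) (c : Char) :
    PySem.Chars.endswith s [c] = (s.getLast? == some c) := by
  by_cases h : s.getLast? = some c
  · simp [h, (endswith_single s c).mpr h]
  · have hf : PySem.Chars.endswith s [c] = false := by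
      cases hE : PySem.Chars.endswith s [c]
      · rfl
      · exact absurd ((endswith_single s c).mp hE) h
    simp [hf, h]

-- the common spec: what both programs compute (before the final strip) from the stripped lines
def h : List (List Char) → List Char
  | [] => []
  | l :: rest =>
      (if PySem.Chars.endswith l ['-'] then l.dropLast
       else if rest = [] then l else l ++ [' ']) ++ h rest

-- the trailing-hyphen trim of B
def tr (s : List Char) : List Char := if PySem.Chars.endswith s ['-'] then s.dropLast else s

lemma r1_no_nl {l : List Char} (hn : ('\n' : Char) ∉ l) : r1 l = l := by
  induction l with
  | nil => simp [r1]
  | cons c t ih =>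
    rw [r1]
    rw [if_neg (by
      intro hp
      cases t with
      | nil => simp [List.isPrefixOf] at hp
      | cons d t' =>
        simp [List.isPrefixOf] at hp
        exact hn (by rw [hp.2]; simp))]
    rw [ih (fun hm => hn (List.mem_cons_of_mem c hm))]

lemma r2_no_nl {l : List Char} (hn : ('\n' : Char) ∉ l) : r2 l = l := by
  induction l with
  | nil => simp [r2]
  | cons c t ih =>
    rw [r2, if_neg (fun hc => hn (by simp [hc]))]
    rw [ih (fun hm => hn (List.mem_cons_of_mem c hm))]

lemma r2_append {l : List Char} (hn : ('\n' : Char) ∉ l) (X : List Char) :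
    r2 (l ++ X) = l ++ r2 X := by
  induction l with
  | nil => simp
  | cons c t ih =>
    rw [List.cons_append, r2, if_neg (fun hc => hn (by simp [hc]))]
    rw [ih (fun hm => hn (List.mem_cons_of_mem c hm))]
    rfl

lemma r1_cons_nl (X : List Char) : r1 ('\n' :: X) = '\n' :: r1 X := by
  rw [r1, if_neg (by simp [List.isPrefixOf])]

lemma r1_append {l : List Char} (hn : ('\n' : Char) ∉ l) (X : List Char) :
    r1 (l ++ '\n' :: X)
      = if PySem.Chars.endswith l ['-'] then l.dropLast ++ r1 X else l ++ '\n' :: r1 X := by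
  induction l with
  | nil =>
    rw [List.nil_append, r1_cons_nl]
    rw [endswith_eq_getLast]
    simp
  | cons c t ih =>
    have hnt : ('\n' : Char) ∉ t := fun hm => hn (List.mem_cons_of_mem c hm)
    cases t with
    | nil =>
      by_cases hc2 : c = '-'
      · subst hc2
        rw [show (['-'] : List Char) ++ '\n' :: X = '-' :: '\n' :: X from rfl]
        rw [show r1 ('-' :: '\n' :: X) = r1 X from by
          rw [r1, if_pos (by simp [List.isPrefixOf])]
          rfl]
        rw [if_pos (by rw [endswith_eq_getLast]; simp)]
        simp
      · rw [show ([c] : List Char) ++ '\n' :: X = c :: '\n' :: X from rfl]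
        rw [r1_nomatch c '\n' X (fun hp => hc2 hp.1), r1_cons_nl]
        rw [if_neg (by rw [endswith_eq_getLast]; simp; exact hc2)]
        rfl
    | cons d t'' =>
      have hd : d ≠ '\n' := fun hdd => hn (by simp [hdd])
      rw [show ((c :: d :: t'') ++ '\n' :: X) = c :: ((d :: t'') ++ '\n' :: X) from rfl]
      rw [show ((d :: t'') ++ '\n' :: X) = d :: (t'' ++ '\n' :: X) from rfl]
      rw [r1_nomatch c d (t'' ++ '\n' :: X) (fun hp => hd hp.2)]
      rw [show (d :: (t'' ++ '\n' :: X)) = ((d :: t'') ++ '\n' :: X) from rfl]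
      rw [ih hnt]
      simp only [endswith_eq_getLast, List.getLast?_cons_cons]
      by_cases hE : (d :: t'').getLast? = some '-'
      · simp [hE]
      · simp [hE]

lemma tr_push (l j : List Char) :
    tr (l ++ '\n' :: j) = l ++ '\n' :: tr j := by
  have hg : (l ++ '\n' :: j).getLast? = ('\n' :: j).getLast? := by
    rw [List.getLast?_append]
    exact Option.or_of_isSome (by rw [List.getLast?_isSome]; simp)
  unfold tr
  simp only [endswith_eq_getLast, hg]
  cases j with
  | nil => simp
  | cons d j' =>
    rw [List.getLast?_cons_cons]
    by_cases hd : (d :: j').getLast? = some '-'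
    · simp only [hd, BEq.rfl, if_pos]
      rw [List.dropLast_append_of_ne_nil (by simp)]
      rfl
    · simp [hd]

lemma B_char : ∀ L : List (List Char), (∀ l ∈ L, ('\n' : Char) ∉ l) →
    r2 (r1 (tr (PySem.Chars.join ['\n'] L))) = h L := by
  intro L
  induction L with
  | nil =>
    intro _
    have hjoin : PySem.Chars.join ['\n'] ([] : List (List Char)) = [] := by
      simp [PySem.Chars.join, List.intercalate]
    rw [hjoin]
    simp [tr, endswith_eq_getLast, r1, r2, h]
  | cons l rest ih =>
    intro hmem
    have hl : ('\n' : Char) ∉ l := hmem l List.mem_cons_self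
    have hrest : ∀ x ∈ rest, ('\n' : Char) ∉ x := fun x hx => hmem x (List.mem_cons_of_mem l hx)
    cases rest with
    | nil =>
      rw [PySem.Chars.join_singleton]
      have hnl' : ('\n' : Char) ∉ tr l := by
        unfold tr
        split
        · exact fun hm => hl (List.Sublist.mem hm (List.dropLast_sublist l))
        · exact hl
      rw [r1_no_nl hnl', r2_no_nl hnl']
      unfold tr
      by_cases hE : PySem.Chars.endswith l ['-'] <;> simp [h, hE]
    | cons r rs =>
      rw [PySem.Chars.join_cons_cons]
      rw [show l ++ ['\n'] ++ PySem.Chars.join ['\n'] (r :: rs)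
          = l ++ '\n' :: PySem.Chars.join ['\n'] (r :: rs) from by simp]
      rw [tr_push, r1_append hl]
      by_cases hE : PySem.Chars.endswith l ['-']
      · rw [if_pos hE]
        rw [r2_append (fun hm => hl (List.Sublist.mem hm (List.dropLast_sublist l)))]
        rw [ih hrest]
        simp [h, hE]
      · rw [if_neg hE]
        rw [r2_append hl]
        rw [show r2 ('\n' :: r1 (tr (PySem.Chars.join ['\n'] (r :: rs))))
            = ' ' :: r2 (r1 (tr (PySem.Chars.join ['\n'] (r :: rs)))) from by rw [r2]; simp]
        rw [ih hrest]
        simp [h, hE]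

lemma foldA (N : Int) : ∀ (ls : List (List Char)) (i : Int) (acc : List Char), i + ls.length = N →
    (PySem.List.enumerate ls i).foldl
      (fun result p =>
        let line := PySem.Chars.strip p.2
        if PySem.Chars.endswith line ['-'] then
          result ++ PySem.List.slice line none (some (-1))
        else
          if p.1 < N - 1 then result ++ (line ++ [' ']) else result ++ line) acc
      = acc ++ h (ls.map PySem.Chars.strip) := by
  intro ls
  induction ls with
  | nil => intro i acc _; simp [PySem.List.enumerate, h]
  | cons l rest ih =>
    intro i acc hi
    rw [show PySem.List.enumerate (l :: rest) i = (i, l) :: PySem.List.enumerate rest (i + 1) from by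
      simp [PySem.List.enumerate]]
    rw [List.foldl_cons]
    rw [ih (i + 1) _ (by simp at hi ⊢; omega)]
    simp only [listSlice_neg_one]
    by_cases hr : rest = []
    · subst hr
      have hlt : ¬ (i < N - 1) := by simp at hi; omega
      simp only [hlt, if_false, List.map_cons, List.map_nil, h]
      by_cases hE : PySem.Chars.endswith (PySem.Chars.strip l) ['-']
      · simp [hE, h]
      · simp [hE, h]
    · have hlt : i < N - 1 := by
        have hlen : (0 : Int) < rest.length := by
          cases rest with
          | nil => exact absurd rfl hr
          | cons a b => simp
        simp at hi; omega
      simp only [hlt, if_true, List.map_cons, h]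
      have hmr : rest.map PySem.Chars.strip ≠ [] := by simpa using hr
      by_cases hE : PySem.Chars.endswith (PySem.Chars.strip l) ['-']
      · simp [hE, hmr, List.append_assoc]
      · simp [hE, hmr, List.append_assoc]

-- ===== VERDICT (by name: the statement is the Claim_ definition above) =====
theorem fix_multiline_cell_spec : Claim_equal_fix_multiline_cell := by
  intro text _
  unfold Spec_fix_multiline_cell fix_multiline_cell fix_multiline_cell_alt
  by_cases htext : text = ""
  · simp [htext]
  · simp only [if_neg htext, splitOn_eq_splitNL]
    have hmem : ∀ l ∈ (splitNL text.toList).map PySem.Chars.strip, ('\n' : Char) ∉ l := by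
      intro l hl
      obtain ⟨l₀, hl₀, rfl⟩ := List.mem_map.mp hl
      intro hc
      exact splitNL_no_nl text.toList l₀ hl₀ (mem_of_mem_strip hc)
    rw [foldA (((splitNL text.toList).length : Int)) _ 0 [] (by simp)]
    rw [listSlice_neg_one]
    have htr : (if PySem.Chars.endswith
        (PySem.Chars.join ['\n'] ((splitNL text.toList).map PySem.Chars.strip)) ['-'] then
        (PySem.Chars.join ['\n'] ((splitNL text.toList).map PySem.Chars.strip)).dropLast
      else PySem.Chars.join ['\n'] ((splitNL text.toList).map PySem.Chars.strip))
        = tr (PySem.Chars.join ['\n'] ((splitNL text.toList).map PySem.Chars.strip)) := rfl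
    rw [htr, replace_eq_r1, replace_eq_r2, B_char _ hmem]
    simp
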